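-- pv_equiv track=rewrite | github.com/rom-eo/MyOMR | Myomr4.py | intToBase58
-- ===== SOURCE A (Python) =====
-- def intToBase58(anInt):
--     Base58='123456789abcdefghijkmnopqrstuvwxyzABCDEFGHJKLMNPQRSTUVWXYZ'
--     res=[]
--     while anInt>=58:
--         res.append(anInt%58)
--         anInt=anInt//58
--     res.append(anInt)
--     res=[Base58[a] for a in res]
--     return "".join(res)
-- ===== SOURCE B (Python) =====
-- def intToBase58(anInt):
--     Base58 = '123456789abcdefghijkmnopqrstuvwxyzABCDEFGHJKLMNPQRSTUVWXYZ'
--     if anInt < 58: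
--         return Base58[anInt]
--     return Base58[anInt % 58] + intToBase58(anInt // 58)
-- ===== Notes on version B (the rewrite author's own statement) =====
-- stated objective: simpler
-- what changed: Replaced the accumulate-digits-then-map-then-join while loop with a direct recursive base conversion that emits each character as it goes (same least-significant-first order, no intermediate list).
-- outside the precondition, e.g. on intToBase58(-59): A raises IndexError, B raises IndexError
import Mathlib
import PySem

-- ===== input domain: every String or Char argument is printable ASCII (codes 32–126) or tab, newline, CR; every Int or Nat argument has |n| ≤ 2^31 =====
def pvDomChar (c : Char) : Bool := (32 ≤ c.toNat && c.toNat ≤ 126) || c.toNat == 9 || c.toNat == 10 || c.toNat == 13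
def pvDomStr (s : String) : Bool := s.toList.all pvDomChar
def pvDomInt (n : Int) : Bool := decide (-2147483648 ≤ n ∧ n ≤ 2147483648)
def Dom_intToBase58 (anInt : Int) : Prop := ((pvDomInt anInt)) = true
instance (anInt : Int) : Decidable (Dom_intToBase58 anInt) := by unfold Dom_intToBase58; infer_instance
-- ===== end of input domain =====

-- B replaces A's accumulate-then-map-then-join while loop by a direct recursive base conversion (simpler; same cost).

-- ===== PORT A =====
-- the Base58 alphabet string, as its code points
def b58chars : List Char := "123456789abcdefghijkmnopqrstuvwxyzABCDEFGHJKLMNPQRSTUVWXYZ".toList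

-- the 'while anInt>=58' loop of A, accumulating the digit list 'res'
def b58loop (anInt : Int) (res : List Int) : List Int :=
  if 58 ≤ anInt then
    b58loop (PySem.Int.floordiv anInt 58) (res ++ [PySem.Int.mod anInt 58])
  else res ++ [anInt]
termination_by anInt.toNat
decreasing_by
  have h : PySem.Int.floordiv anInt 58 = anInt / 58 :=
    PySem.Int.floordiv_eq_ediv_of_pos (by omega)
  rw [h]; omega

-- Base58[a] under Pre_ the index is in range; ' ' default never used there
def intToBase58 (anInt : Int) : String :=
  String.mk ((b58loop anInt []).map (fun a => PySem.List.pyGetD b58chars a ' '))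

-- ===== PORT B =====
-- recursive base conversion, least-significant digit first, character by character
def b58alt (anInt : Int) : List Char :=
  if anInt < 58 then [PySem.List.pyGetD b58chars anInt ' ']
  else PySem.List.pyGetD b58chars (PySem.Int.mod anInt 58) ' ' ::
       b58alt (PySem.Int.floordiv anInt 58)
termination_by anInt.toNat
decreasing_by
  have h : PySem.Int.floordiv anInt 58 = anInt / 58 :=
    PySem.Int.floordiv_eq_ediv_of_pos (by omega)
  rw [h]; omega

def intToBase58_alt (anInt : Int) : String := String.mk (b58alt anInt)

-- ===== PRECONDITION & SPEC =====
-- Pre_ excludes anInt ≤ -59, where Python A (and B alike) raises IndexError on Base58[anInt]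
def Pre_intToBase58 (anInt : Int) : Prop := -58 ≤ anInt
instance (anInt : Int) : Decidable (Pre_intToBase58 anInt) := by unfold Pre_intToBase58; infer_instance
def pvWitness_intToBase58 : Int := (100)
def Spec_intToBase58 (anInt : Int) (out : String) : Prop := out = intToBase58_alt anInt
instance (anInt : Int) (out : String) : Decidable (Spec_intToBase58 anInt out) := by unfold Spec_intToBase58; infer_instance

-- ===== CLAIM (what is proved, stated in full; the proofs are below) =====
def Claim_equal_intToBase58 : Prop := ∀ (anInt : Int), Dom_intToBase58 anInt → Pre_intToBase58 anInt → Spec_intToBase58 anInt (intToBase58 anInt)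

-- ===== LEMMAS AND PROOFS =====

-- the loop only appends: pull the accumulator out front
theorem b58loop_acc (anInt : Int) (res : List Int) :
    b58loop anInt res = res ++ b58loop anInt [] := by
  induction hn : anInt.toNat using Nat.strong_induction_on generalizing anInt res with
  | _ n ih =>
    by_cases h : 58 ≤ anInt
    · have hd : PySem.Int.floordiv anInt 58 = anInt / 58 :=
        PySem.Int.floordiv_eq_ediv_of_pos (by omega)
      have hlt : (PySem.Int.floordiv anInt 58).toNat < n := by rw [hd]; omega
      rw [b58loop, if_pos h, ih _ hlt _ _ rfl]
      conv_rhs => rw [b58loop, if_pos h, ih _ hlt _ _ rfl]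
      simp
    · rw [b58loop, if_neg h]
      conv_rhs => rw [b58loop, if_neg h]
      simp

-- B's character list is A's digit list mapped through the alphabet
theorem b58alt_eq (anInt : Int) :
    b58alt anInt = (b58loop anInt []).map (fun a => PySem.List.pyGetD b58chars a ' ') := by
  induction anInt using b58alt.induct with
  | case1 n h =>
      rw [b58alt, if_pos h, b58loop, if_neg (by omega)]; simp
  | case2 n h ih =>
      rw [b58alt, if_neg h, b58loop, if_pos (by omega)]
      simp only [List.nil_append]
      rw [b58loop_acc (PySem.Int.floordiv n 58) [PySem.Int.mod n 58], ih]
      simp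

-- ===== VERDICT (by name: the statement is the Claim_ definition above) =====
theorem intToBase58_spec : Claim_equal_intToBase58 := by
  intro anInt _ _
  unfold Spec_intToBase58 intToBase58 intToBase58_alt
  rw [b58alt_eq]
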